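-- pv_equiv track=rewrite | github.com/marcmengel/metacat2amsc | metacat2amsc/generate_metadata_remote.py | get_suffix
-- ===== SOURCE A (Python) =====
-- def get_suffix(fname):
--     pos = fname.rfind(".")
--     if pos > 0:
--         suffix = fname[pos + 1 :]
--         if suffix == "gz":
--             return True, get_suffix(fname[:pos])[1]
--         return False, suffix
--     return False, ""
-- ===== SOURCE B (Python) =====
-- def get_suffix(fname):
--     # Split once on '.' and walk the parts from the right, instead of
--     # repeated rfind/slice recursion.
--     parts = fname.split(".")
--     was_gz = False
--     while len(parts) > 2 or (len(parts) == 2 and parts[0] != ""):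
--         if parts[-1] == "gz":
--             was_gz = True
--             parts.pop()
--         else:
--             return was_gz, parts[-1]
--     return was_gz, ""
-- ===== Notes on version B (the rewrite author's own statement) =====
-- stated objective: alternative
-- what changed: Replaces A's rfind/slice tail recursion by a single split('.') followed by a right-to-left walk over the parts list with a was_gz flag (no repeated rfind or string slicing).
import Mathlib
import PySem

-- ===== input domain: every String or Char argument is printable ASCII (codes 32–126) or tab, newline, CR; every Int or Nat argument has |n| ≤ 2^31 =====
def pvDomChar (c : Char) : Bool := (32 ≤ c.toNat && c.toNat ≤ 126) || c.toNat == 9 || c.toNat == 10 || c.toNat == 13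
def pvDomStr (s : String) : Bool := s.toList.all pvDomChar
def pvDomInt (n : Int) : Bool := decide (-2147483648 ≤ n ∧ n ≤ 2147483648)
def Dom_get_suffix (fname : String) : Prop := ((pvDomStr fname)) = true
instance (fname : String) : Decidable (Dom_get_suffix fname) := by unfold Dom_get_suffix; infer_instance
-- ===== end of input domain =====

-- B replaces A's rfind/slice tail recursion by one split('.') and a right-to-left walk
-- over the parts with a was_gz flag (objective: alternative algorithm, same cost class).


-- ===== PORT A =====

-- used by getSuffixA's decreasing_by: a non-negative rfind result points at an occurrence
theorem rfind_go_dot_cases (cs : List Char) :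
    ∀ n, PySem.Chars.rfind.go cs ['.'] n = -1 ∨
      ∃ j : Nat, PySem.Chars.rfind.go cs ['.'] n = (j : Int) ∧
        (['.'].isPrefixOf (cs.drop j)) = true := by
  intro n
  induction n with
  | zero =>
    simp only [PySem.Chars.rfind.go]
    split
    · exact Or.inr ⟨0, rfl, by simpa only [List.drop_zero] using ‹_›⟩
    · exact Or.inl rfl
  | succ m ih =>
    simp only [PySem.Chars.rfind.go]
    split
    · exact Or.inr ⟨m + 1, by norm_cast, ‹_›⟩
    · exact ih

theorem rfind_dot_toNat_lt (cs : List Char) (h : 0 < PySem.Chars.rfind cs ['.']) :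
    (PySem.Chars.rfind cs ['.']).toNat < cs.length := by
  rcases rfind_go_dot_cases cs cs.length with h1 | ⟨j, hj, hpre⟩
  · rw [PySem.Chars.rfind] at h; omega
  · rw [PySem.Chars.rfind] at h ⊢
    rw [hj]
    rw [hj] at h
    have : cs.drop j ≠ [] := by
      intro hnil
      rw [hnil] at hpre
      simp at hpre
    have hlt : j < cs.length := by
      by_contra hge
      exact this (List.drop_eq_nil_of_le (by omega))
    simpa using hlt

-- literal port of A's recursion (over the code points; the String wrapper is below)
def getSuffixA (cs : List Char) : Bool × List Char :=
  if 0 < PySem.Chars.rfind cs ['.'] then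
    if PySem.List.slice cs (some (PySem.Chars.rfind cs ['.'] + 1)) none = ['g', 'z'] then
      (true, (getSuffixA (PySem.List.slice cs none (some (PySem.Chars.rfind cs ['.'])))).2)
    else (false, PySem.List.slice cs (some (PySem.Chars.rfind cs ['.'] + 1)) none)
  else (false, [])
termination_by cs.length
decreasing_by
  rename_i h _
  have hlt := rfind_dot_toNat_lt cs h
  rw [PySem.List.slice_to _ (le_of_lt h)]
  simp
  omega

def get_suffix (fname : String) : Bool × String :=
  ((getSuffixA fname.toList).1, String.ofList (getSuffixA fname.toList).2)

-- ===== PORT B =====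

-- literal port of B's while loop over the parts list (parts[-1] is pyGet? at -1;
-- the loop guard guarantees the list is nonempty, so Python's parts[-1] never
-- raises and the .getD [] default is never used)
def getSuffixBgo (wasGz : Bool) (parts : List (List Char)) : Bool × List Char :=
  if 2 < parts.length ∨ (parts.length = 2 ∧ parts.headD [] ≠ []) then
    if (PySem.List.pyGet? parts (-1)).getD [] = ['g', 'z'] then
      getSuffixBgo true parts.dropLast
    else (wasGz, (PySem.List.pyGet? parts (-1)).getD [])
  else (wasGz, [])
termination_by parts.length
decreasing_by
  rename_i h _
  have h2 : 2 ≤ parts.length := by rcases h with h | ⟨h, _⟩ <;> omega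
  simp only [List.length_dropLast]; omega

def get_suffix_alt (fname : String) : Bool × String :=
  ((getSuffixBgo false (PySem.Chars.splitOn fname.toList ['.'])).1,
   String.ofList (getSuffixBgo false (PySem.Chars.splitOn fname.toList ['.'])).2)

-- ===== PRECONDITION & SPEC =====
def Spec_get_suffix (fname : String) (out : Bool × String) : Prop := out = get_suffix_alt fname
instance (fname : String) (out : Bool × String) : Decidable (Spec_get_suffix fname out) := by unfold Spec_get_suffix; infer_instance

-- ===== CLAIM (what is proved, stated in full; the proofs are below) =====
def Claim_equal_get_suffix : Prop := ∀ (fname : String), Dom_get_suffix fname → Spec_get_suffix fname (get_suffix fname)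

-- ===== LEMMAS AND PROOFS =====

-- clean recursive specification of splitting on '.'
def spDot : List Char → List (List Char)
  | [] => [[]]
  | c :: rest => if c = '.' then [] :: spDot rest else (spDot rest).modifyHead (c :: ·)

theorem spDot_ne_nil (cs : List Char) : spDot cs ≠ [] := by
  cases cs with
  | nil => simp [spDot]
  | cons c rest =>
    simp only [spDot]
    split
    · simp
    · cases hs : spDot rest with
      | nil => exact absurd hs (spDot_ne_nil rest)
      | cons x xs => simp [List.modifyHead]

theorem splitOn_go_dot (fuel : Nat) : ∀ (l cur : List Char) (acc : List (List Char)),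
    l.length < fuel →
    PySem.Chars.splitOn.go ['.'] fuel l cur acc =
      acc.reverse ++ (spDot l).modifyHead (cur.reverse ++ ·) := by
  induction fuel with
  | zero => intro l cur acc h; omega
  | succ m ih =>
    intro l cur acc h
    cases l with
    | nil =>
      simp [PySem.Chars.splitOn.go, spDot, List.modifyHead]
    | cons c rest =>
      simp only [PySem.Chars.splitOn.go]
      by_cases hc : c = '.'
      · subst hc
        rw [if_pos (by simp [List.isPrefixOf])]
        rw [ih _ _ _ (by simpa using Nat.lt_of_succ_lt_succ h)]
        simp only [spDot, List.modifyHead, List.reverse_cons, List.append_assoc,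
          List.reverse_nil, List.nil_append, List.singleton_append]
        cases hs : spDot rest <;> simp [hs]
      · rw [if_neg (by simp [List.isPrefixOf]; exact fun hh => hc hh.symm)]
        rw [ih _ _ _ (by simpa using Nat.lt_of_succ_lt_succ h)]
        simp only [spDot, if_neg hc]
        cases hs : spDot rest with
        | nil => exact absurd hs (spDot_ne_nil rest)
        | cons x xs => simp [List.modifyHead]

theorem splitOn_dot (cs : List Char) : PySem.Chars.splitOn cs ['.'] = spDot cs := by
  rw [PySem.Chars.splitOn, splitOn_go_dot _ _ _ _ (by omega)]
  cases hs : spDot cs with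
  | nil => exact absurd hs (spDot_ne_nil cs)
  | cons x xs => simp [List.modifyHead]

theorem spDot_no_dot (cs : List Char) (h : '.' ∉ cs) : spDot cs = [cs] := by
  induction cs with
  | nil => simp [spDot]
  | cons c rest ih =>
    have hc : ¬ c = '.' := by rintro rfl; exact h (by simp)
    simp only [spDot, if_neg hc]
    rw [ih (fun hm => h (by simp [hm]))]
    simp [List.modifyHead]

theorem spDot_append (a b : List Char) : spDot (a ++ '.' :: b) = spDot a ++ spDot b := by
  induction a with
  | nil => simp [spDot]
  | cons c a' ih =>
    simp only [List.cons_append, spDot, ih]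
    split
    · simp
    · cases hs : spDot a' with
      | nil => exact absurd hs (spDot_ne_nil a')
      | cons x xs => simp [List.modifyHead]

theorem spDot_singleton (a x : List Char) (h : spDot a = [x]) : x = a := by
  induction a generalizing x with
  | nil => simp [spDot] at h; exact h
  | cons c rest ih =>
    simp only [spDot] at h
    split at h
    · rcases List.cons_eq_cons.mp h with ⟨h1, h2⟩
      exact absurd h2.symm (fun hh => spDot_ne_nil rest hh.symm)
    · cases hs : spDot rest with
      | nil => exact absurd hs (spDot_ne_nil rest)
      | cons y ys =>
        rw [hs] at h
        simp [List.modifyHead] at h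
        rcases h with ⟨rfl, rfl⟩
        have := ih y (by rw [hs])
        simp [this]

theorem prefix_dot (cs : List Char) (j : Nat) :
    (['.'].isPrefixOf (cs.drop j)) = true ↔ cs[j]? = some '.' := by
  have hh : (cs.drop j).head? = cs[j]? := List.head?_drop ..
  cases hd : cs.drop j with
  | nil => rw [hd] at hh; simp [List.isPrefixOf, ← hh]
  | cons x xs =>
    rw [hd] at hh
    simp only [List.head?] at hh
    rw [← hh]
    constructor
    · intro h
      simp only [List.isPrefixOf, Bool.and_eq_true, beq_iff_eq] at h
      simp [h.1.symm]
    · intro h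
      simp only [Option.some.injEq] at h
      subst h
      simp [List.isPrefixOf]

theorem rfind_go_none (cs : List Char) (n : Nat)
    (h : ∀ j : Nat, j ≤ n → cs[j]? ≠ some '.') :
    PySem.Chars.rfind.go cs ['.'] n = -1 := by
  induction n with
  | zero =>
    simp only [PySem.Chars.rfind.go]
    rw [if_neg]
    intro hp
    exact h 0 (le_refl _) ((prefix_dot cs 0).mp (by simpa using hp))
  | succ m ih =>
    simp only [PySem.Chars.rfind.go]
    rw [if_neg]
    · exact ih (fun j hj => h j (by omega))
    · intro hp
      exact h (m + 1) (le_refl _) ((prefix_dot cs (m + 1)).mp hp)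

theorem rfind_go_eq (cs : List Char) (p : Nat) (hp : cs[p]? = some '.') :
    ∀ n, p ≤ n → (∀ j : Nat, p < j → j ≤ n → cs[j]? ≠ some '.') →
    PySem.Chars.rfind.go cs ['.'] n = (p : Int) := by
  intro n
  induction n with
  | zero =>
    intro hle _
    have : p = 0 := by omega
    subst this
    simp only [PySem.Chars.rfind.go]
    rw [if_pos (by simpa using (prefix_dot cs 0).mpr hp)]
    simp
  | succ m ih =>
    intro hle hnone
    simp only [PySem.Chars.rfind.go]
    by_cases hpm : p = m + 1
    · subst hpm
      rw [if_pos ((prefix_dot cs (m + 1)).mpr hp)]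
    · rw [if_neg]
      · exact ih (by omega) (fun j h1 h2 => hnone j h1 (by omega))
      · intro hpre
        exact hnone (m + 1) (by omega) (le_refl _) ((prefix_dot cs (m + 1)).mp hpre)

theorem rfind_no_dot (cs : List Char) (h : '.' ∉ cs) : PySem.Chars.rfind cs ['.'] = -1 := by
  rw [PySem.Chars.rfind]
  refine rfind_go_none cs cs.length (fun j _ hj => ?_)
  exact h (List.mem_of_getElem? hj)

theorem rfind_last (pre suf : List Char) (h : '.' ∉ suf) :
    PySem.Chars.rfind (pre ++ '.' :: suf) ['.'] = (pre.length : Int) := by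
  rw [PySem.Chars.rfind]
  refine rfind_go_eq _ pre.length ?_ _ (by simp) ?_
  · rw [List.getElem?_append_right (le_refl _)]
    simp
  · intro j h1 h2 hj
    rw [List.getElem?_append_right (by omega)] at hj
    have : ('.' :: suf)[j - pre.length]? = some '.' := hj
    rcases Nat.exists_eq_add_of_lt h1 with ⟨k, hk⟩
    have hk' : j - pre.length = k + 1 := by omega
    rw [hk'] at this
    simp at this
    exact h (List.mem_of_getElem? this)

theorem dot_decomp (cs : List Char) (h : '.' ∈ cs) :
    ∃ pre suf, cs = pre ++ '.' :: suf ∧ '.' ∉ suf := by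
  induction cs with
  | nil => simp at h
  | cons c rest ih =>
    by_cases hr : '.' ∈ rest
    · obtain ⟨p, s, rfl, hs⟩ := ih hr
      exact ⟨c :: p, s, rfl, hs⟩
    · have : c = '.' := by simp at h; tauto
      exact ⟨[], rest, by simp [this], hr⟩

theorem pyGet_neg_one_concat (l : List (List Char)) (a : List Char) :
    PySem.List.pyGet? (l ++ [a]) (-1) = some a := by
  simp [PySem.List.pyGet?, PySem.List.pyIdx?]

theorem main_loop (cs : List Char) (w : Bool) :
    getSuffixBgo w (PySem.Chars.splitOn cs ['.']) =
      (w || (getSuffixA cs).1, (getSuffixA cs).2) := by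
  by_cases hmem : '.' ∈ cs
  · obtain ⟨pre, suf, rfl, hsuf⟩ := dot_decomp cs hmem
    have hr := rfind_last pre suf hsuf
    rw [splitOn_dot, spDot_append, spDot_no_dot suf hsuf]
    by_cases hpre0 : pre = []
    · subst hpre0
      rw [getSuffixA, if_neg (by rw [hr]; simp)]
      rw [getSuffixBgo]
      simp [spDot]
    · have hlen : 0 < pre.length := List.length_pos_iff.mpr hpre0
      have hsuffix : PySem.List.slice (pre ++ '.' :: suf)
          (some (PySem.Chars.rfind (pre ++ '.' :: suf) ['.'] + 1)) none = suf := by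
        rw [hr]
        have : (pre.length : Int) + 1 = ((pre.length + 1 : Nat) : Int) := by push_cast; ring
        rw [this, PySem.List.slice_from_natCast]
        rw [← List.drop_drop, List.drop_left]
        simp
      have htake : PySem.List.slice (pre ++ '.' :: suf) none
          (some (PySem.Chars.rfind (pre ++ '.' :: suf) ['.'])) = pre := by
        rw [hr, PySem.List.slice_to_natCast, List.take_left]
      have hguard : 2 < (spDot pre ++ [suf]).length ∨
          ((spDot pre ++ [suf]).length = 2 ∧ (spDot pre ++ [suf]).headD [] ≠ []) := by
        cases hsp : spDot pre with
        | nil => exact absurd hsp (spDot_ne_nil pre)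
        | cons x xs =>
          cases xs with
          | nil =>
            refine Or.inr ⟨by simp, ?_⟩
            have : x = pre := spDot_singleton pre x hsp
            simp [this, hpre0]
          | cons y ys => exact Or.inl (by simp only [List.length_append, List.length_cons]; omega)
      have hlast : (PySem.List.pyGet? (spDot pre ++ [suf]) (-1)).getD [] = suf := by
        rw [pyGet_neg_one_concat]; rfl
      rw [getSuffixA, if_pos (by rw [hr]; exact_mod_cast hlen)]
      rw [getSuffixBgo, if_pos hguard]
      rw [hsuffix, htake, hlast]
      by_cases hgz : suf = ['g', 'z']
      · rw [if_pos hgz, if_pos hgz]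
        rw [List.dropLast_concat, ← splitOn_dot]
        rw [main_loop pre true]
        simp
      · rw [if_neg hgz, if_neg hgz]
        simp
  · rw [splitOn_dot, spDot_no_dot cs hmem]
    rw [getSuffixA, if_neg (by rw [rfind_no_dot cs hmem]; omega)]
    rw [getSuffixBgo, if_neg (by simp)]
    cases w <;> rfl
termination_by cs.length
decreasing_by
  have hx := ‹cs = pre ++ '.' :: suf›
  rw [hx]
  simp only [List.length_append, List.length_cons]
  omega

-- ===== VERDICT (by name: the statement is the Claim_ definition above) =====
theorem get_suffix_spec : Claim_equal_get_suffix := by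
  intro fname _
  unfold Spec_get_suffix get_suffix get_suffix_alt
  rw [main_loop]
  simp
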